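-- pv_equiv track=rewrite | github.com/Aqua3k/DebugEnvironmentForHeuristic | mysrc/program_rannner.py | get_score_from_stdout
-- ===== SOURCE A (Python) =====
-- def get_score_from_stdout(string: str) -> int:
--     """標準出力から得点を取り出す
--
--     Args:
--         string(str): 得点を取り出す元の文字列
--     Returns:
--         int: 得点
--     """
--     u = string.lower()
--     if "score" in u:
--         idx = u.index("score")
--     else:
--         idx = 0
--     s = ""
--     flg = False
--     for t in u[idx:]:
--         if "0" <= t <= "9":
--             s += t
--             flg = True
--         else:
--             if flg: break
--     try   : ret = int(s)
--     except: ret = 0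
--     return ret
-- ===== SOURCE B (Python) =====
-- import re
--
-- def get_score_from_stdout(string: str) -> int:
--     u = string.lower()
--     idx = u.index("score") if "score" in u else 0
--     m = re.search(r'[0-9]+', u[idx:])
--     return int(m.group()) if m else 0
-- ===== Notes on version B (the rewrite author's own statement) =====
-- stated objective: idiomatic
-- what changed: The character-by-character flag/accumulator loop that collects the first digit run of the tail is replaced by a single regex search for [0-9]+ over it.
import Mathlib
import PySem

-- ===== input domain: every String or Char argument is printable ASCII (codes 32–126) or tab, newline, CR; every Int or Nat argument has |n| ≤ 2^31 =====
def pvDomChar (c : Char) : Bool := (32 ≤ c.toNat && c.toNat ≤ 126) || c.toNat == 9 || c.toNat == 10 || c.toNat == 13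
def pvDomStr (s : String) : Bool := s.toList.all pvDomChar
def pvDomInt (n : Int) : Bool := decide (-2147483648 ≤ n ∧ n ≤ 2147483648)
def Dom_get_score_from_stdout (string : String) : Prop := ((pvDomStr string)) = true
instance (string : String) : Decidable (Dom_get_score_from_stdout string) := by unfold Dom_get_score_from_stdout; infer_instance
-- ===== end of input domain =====

-- B replaces A's flag/accumulator character loop by a single first-match search for a digit run
-- (regex [0-9]+ in Python, dropWhile/takeWhile here); objective: idiomatic, same cost.

-- digit test '0' <= t <= '9' (= the regex class [0-9]); shared by both ports
def pvDigit (t : Char) : Bool := decide ('0' ≤ t ∧ t ≤ '9')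

-- ===== PORT A =====
-- the for-loop over u[idx:] with accumulator s and flag flg ('break' = returning s)
def pvLoopA : List Char → List Char → Bool → List Char
  | [], s, _ => s
  | t :: rest, s, flg =>
    if pvDigit t then pvLoopA rest (s ++ [t]) true
    else if flg then s else pvLoopA rest s flg

def get_score_from_stdout (string : String) : Int :=
  let u := (PySem.Str.lower string).toList
  let idx : Int := if PySem.Chars.isIn "score".toList u then PySem.Chars.find u "score".toList else 0
  let s := pvLoopA (PySem.List.slice u (some idx) none) [] false
  ((PySem.Int.ofChars? s).getD 0)   -- try int(s) except: 0

-- ===== PORT B =====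
def get_score_from_stdout_alt (string : String) : Int :=
  let u := (PySem.Str.lower string).toList
  let idx : Int := if PySem.Chars.isIn "score".toList u then PySem.Chars.find u "score".toList else 0
  -- re.search(r'[0-9]+', u[idx:]): skip to the first digit, take the maximal digit run
  let m := ((PySem.List.slice u (some idx) none).dropWhile (fun c => !pvDigit c)).takeWhile pvDigit
  if m.isEmpty then 0 else (PySem.Int.ofChars? m).getD 0

-- ===== PRECONDITION & SPEC =====
def Spec_get_score_from_stdout (string : String) (out : Int) : Prop := out = get_score_from_stdout_alt string
instance (string : String) (out : Int) : Decidable (Spec_get_score_from_stdout string out) := by unfold Spec_get_score_from_stdout; infer_instance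

-- ===== CLAIM (what is proved, stated in full; the proofs are below) =====
def Claim_equal_get_score_from_stdout : Prop := ∀ (string : String), Dom_get_score_from_stdout string → Spec_get_score_from_stdout string (get_score_from_stdout string)

-- ===== LEMMAS AND PROOFS =====

-- with the flag set, the loop appends the leading digit run and stops at the first non-digit
theorem pvLoopA_true (l : List Char) : ∀ acc, pvLoopA l acc true = acc ++ l.takeWhile pvDigit := by
  induction l with
  | nil => intro acc; simp [pvLoopA]
  | cons t rest ih =>
    intro acc
    by_cases h : pvDigit t = true
    · simp [pvLoopA, h, ih]
    · simp [pvLoopA, h]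

-- from the initial state the loop computes the first digit run
theorem pvLoopA_false (l : List Char) :
    pvLoopA l [] false = (l.dropWhile (fun c => !pvDigit c)).takeWhile pvDigit := by
  induction l with
  | nil => simp [pvLoopA]
  | cons t rest ih =>
    by_cases h : pvDigit t = true
    · simp [pvLoopA, h, pvLoopA_true]
    · simp [pvLoopA, h, ih]

-- ===== VERDICT (by name: the statement is the Claim_ definition above) =====
theorem get_score_from_stdout_spec : Claim_equal_get_score_from_stdout := by
  intro string _
  unfold Spec_get_score_from_stdout get_score_from_stdout get_score_from_stdout_alt
  simp only [pvLoopA_false]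
  set m := (((PySem.List.slice (PySem.Str.lower string).toList
      (some (if PySem.Chars.isIn "score".toList (PySem.Str.lower string).toList then
        PySem.Chars.find (PySem.Str.lower string).toList "score".toList else 0)) none).dropWhile
      (fun c => !pvDigit c)).takeWhile pvDigit) with hm
  cases m with
  | nil => decide
  | cons c cs => simp
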